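-- pv_equiv track=rewrite | github.com/ayoung0073/Algorithm | programmers/호텔_방_배정.py | rfind
-- ===== SOURCE A (Python) =====
-- def rfind(visited, idx):
--     if idx not in visited:
--         visited[idx] = idx + 1
--         return idx
--     else:
--         ret = rfind(visited, visited[idx]) # visited[idx] > 0 인 상태
--         visited[idx] = ret + 1
--         return ret
-- ===== SOURCE B (Python) =====
-- def rfind(visited, idx):
--     # Iterative chase over a private shrinking copy: pop each key as we pass it,
--     # so termination is structural (the copy shrinks at every step).
--     remaining = dict(visited)
--     path = []
--     while idx in remaining:
--         path.append(idx)
--         idx = remaining.pop(idx)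
--     visited[idx] = idx + 1
--     for node in path:
--         visited[node] = idx + 1
--     return idx
-- ===== Notes on version B (the rewrite author's own statement) =====
-- stated objective: alternative
-- what changed: Replaces A's recursion over the fixed dict by an iterative chase over a private shrinking copy that pops each key as it is passed (structural termination, explicit path list for the relabelling), instead of path compression through the call stack.
import Mathlib
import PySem

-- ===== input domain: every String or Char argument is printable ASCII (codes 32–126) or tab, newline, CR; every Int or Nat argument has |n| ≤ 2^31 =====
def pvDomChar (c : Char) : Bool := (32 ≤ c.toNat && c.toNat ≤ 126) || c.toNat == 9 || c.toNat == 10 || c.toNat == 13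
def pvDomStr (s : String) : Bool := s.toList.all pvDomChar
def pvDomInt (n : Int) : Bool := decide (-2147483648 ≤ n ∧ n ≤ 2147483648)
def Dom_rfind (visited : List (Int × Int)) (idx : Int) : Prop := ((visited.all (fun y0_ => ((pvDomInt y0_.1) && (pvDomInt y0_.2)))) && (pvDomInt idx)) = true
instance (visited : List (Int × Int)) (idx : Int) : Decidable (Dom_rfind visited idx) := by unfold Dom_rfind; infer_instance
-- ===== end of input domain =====

-- B replaces A's recursive find (path compression through the call stack) by an iterative
-- chase over a private shrinking copy of the dict, popping each key as it is passed; B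
-- performs the same final mutation as A, and the equivalence proved is about the RETURN value.


-- ===== PORT A =====
-- first-match lookup: 'idx in visited' / 'visited[idx]' on the dict-as-association-list
def pyDictGet? (visited : List (Int × Int)) (idx : Int) : Option Int :=
  visited.lookup idx

-- A's recursion, with a fuel counter solely as a totality guard (under Pre_ the chain of
-- keys dies out within visited.length steps, so visited.length + 1 fuel always suffices).
def rfindRec (fuel : Nat) (visited : List (Int × Int)) (idx : Int) : Int :=
  match fuel with
  | 0 => idx
  | fuel + 1 =>
    match pyDictGet? visited idx with
    | none => idx                                    -- visited[idx] = idx + 1 (mutation): return value is idx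
    | some v =>
      let ret := rfindRec fuel visited v             -- ret = rfind(visited, visited[idx])
      ret                                            -- visited[idx] = ret + 1 (mutation): return value is ret

def rfind (visited : List (Int × Int)) (idx : Int) : Int :=
  rfindRec (visited.length + 1) visited idx

-- ===== PORT B =====
-- 'remaining.pop(idx)' removes the (first) entry with key idx
def eraseKey (l : List (Int × Int)) (k : Int) : List (Int × Int) :=
  l.eraseP (fun p => p.1 == k)

-- termination lemma for B's loop: popping a present key shrinks the copy
theorem eraseKey_length_lt (l : List (Int × Int)) (k v : Int)
    (h : l.lookup k = some v) : (eraseKey l k).length < l.length := by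
  induction l with
  | nil => simp [List.lookup] at h
  | cons a t ih =>
    obtain ⟨a1, a2⟩ := a
    by_cases hk : a1 = k
    · simp [eraseKey, List.eraseP_cons, hk]
    · have hk1 : (k == a1) = false := by simp [beq_iff_eq]; omega
      have hk2 : (a1 == k) = false := by simp [beq_iff_eq]; omega
      simp only [List.lookup, hk1] at h
      have ht := ih h
      have he : eraseKey ((a1, a2) :: t) k = (a1, a2) :: eraseKey t k := by
        simp [eraseKey, List.eraseP_cons, hk2]
      rw [he]
      simp only [List.length_cons]
      omega

-- B's while-loop: advance idx, popping the entry just used from the shrinking copy and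
-- appending the key to the explicit path list (the path is used only for the relabelling
-- mutation, not for the return value).
def rfindAltGo (remaining : List (Int × Int)) (idx : Int) (path : List Int) : Int :=
  match h : remaining.lookup idx with
  | none => idx                                      -- loop exits: idx is the free room
  | some v => rfindAltGo (eraseKey remaining idx) v (path ++ [idx])
  termination_by remaining.length
  decreasing_by exact eraseKey_length_lt _ _ _ h

def rfind_alt (visited : List (Int × Int)) (idx : Int) : Int :=
  rfindAltGo visited idx []                          -- remaining = dict(visited), path = []

-- ===== PRECONDITION & SPEC =====
-- helpers for the precondition: one peeling step and key membership
def peelAcyclic (l : List (Int × Int)) : List (Int × Int) :=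
  l.filter (fun p => l.any (fun q => q.1 == p.2))

def hasKey (l : List (Int × Int)) (k : Int) : Bool :=
  l.any (fun p => p.1 == k)

-- Pre_ excludes exactly the inputs on which Python A recurses forever (RecursionError):
-- repeatedly discard entries whose successor is not a key of the remaining table; the residue
-- consists of the entries whose successor chains never leave the key set (they lead into a
-- cycle), and A diverges precisely when idx is a key of that residue. This is a graph
-- property of the input table, not a run of either port.
def Pre_rfind (visited : List (Int × Int)) (idx : Int) : Prop :=
  hasKey (peelAcyclic^[visited.length] visited) idx = false
instance (visited : List (Int × Int)) (idx : Int) : Decidable (Pre_rfind visited idx) := by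
  unfold Pre_rfind; infer_instance

def pvWitness_rfind : (List (Int × Int)) × Int := ([(0, 1), (1, 2), (5, 6)], 0)

def Spec_rfind (visited : List (Int × Int)) (idx : Int) (out : Int) : Prop := out = rfind_alt visited idx
instance (visited : List (Int × Int)) (idx : Int) (out : Int) : Decidable (Spec_rfind visited idx out) := by unfold Spec_rfind; infer_instance

-- ===== CLAIM (what is proved, stated in full; the proofs are below) =====
def Claim_equal_rfind : Prop := ∀ (visited : List (Int × Int)) (idx : Int), Dom_rfind visited idx → Pre_rfind visited idx → Spec_rfind visited idx (rfind visited idx)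

-- ===== LEMMAS AND PROOFS =====

-- the peeling iterates form a ⊆-decreasing chain
theorem iter_sublist (l : List (Int × Int)) {i j : Nat} (h : i ≤ j) :
    List.Sublist (peelAcyclic^[j] l) (peelAcyclic^[i] l) := by
  induction j with
  | zero => simp_all
  | succ j ih =>
    rcases Nat.lt_or_ge i (j+1) with hlt | hge
    · have h1 : List.Sublist (peelAcyclic^[j+1] l) (peelAcyclic^[j] l) := by
        rw [Function.iterate_succ_apply']
        unfold peelAcyclic
        apply List.filter_sublist
      exact h1.trans (ih (Nat.lt_succ_iff.mp hlt))
    · have : i = j + 1 := le_antisymm h hge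
      subst this; exact List.Sublist.refl _

theorem hasKey_true_iff (l : List (Int × Int)) (k : Int) :
    hasKey l k = true ↔ ∃ p ∈ l, p.1 = k := by
  simp [hasKey, List.any_eq_true]

theorem lookup_mem {l : List (Int × Int)} {k v : Int} (h : l.lookup k = some v) :
    (k, v) ∈ l := by
  induction l with
  | nil => simp [List.lookup] at h
  | cons a t ih =>
    obtain ⟨a1, a2⟩ := a
    by_cases hk : k = a1
    · have hk1 : (k == a1) = true := by simp [beq_iff_eq, hk]
      simp only [List.lookup, hk1] at h
      simp only [Option.some.injEq] at h
      simp [hk, h]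
    · have hk1 : (k == a1) = false := by simp [beq_iff_eq]; omega
      simp only [List.lookup, hk1] at h
      exact List.mem_cons_of_mem _ (ih h)

-- an entry whose successor is a key of the residue survives every peeling step up to n
theorem stay (l : List (Int × Int)) (k v : Int) (hmem : (k, v) ∈ l)
    (hR : hasKey (peelAcyclic^[l.length] l) v = true) :
    ∀ j, j ≤ l.length → (k, v) ∈ peelAcyclic^[j] l := by
  intro j
  induction j with
  | zero => intro _; simpa using hmem
  | succ j ih =>
    intro hj
    have hmemj : (k, v) ∈ peelAcyclic^[j] l := ih (Nat.le_of_succ_le hj)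
    rw [Function.iterate_succ_apply']
    unfold peelAcyclic
    rw [List.mem_filter]
    refine ⟨hmemj, ?_⟩
    rcases (hasKey_true_iff _ _).mp hR with ⟨q, hq, hqk⟩
    have hqj : q ∈ peelAcyclic^[j] l :=
      (iter_sublist l (Nat.le_of_succ_le hj)).subset hq
    simp only [List.any_eq_true]
    exact ⟨q, hqj, by simp [hqk]⟩

-- the chased successor of a key outside the residue is again outside the residue
theorem chain_out (l : List (Int × Int)) (idx v : Int)
    (hi : hasKey (peelAcyclic^[l.length] l) idx = false)
    (hl : l.lookup idx = some v) :
    hasKey (peelAcyclic^[l.length] l) v = false := by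
  by_contra h
  have hv : hasKey (peelAcyclic^[l.length] l) v = true := by
    cases hvv : hasKey (peelAcyclic^[l.length] l) v with
    | false => exact absurd hvv h
    | true => rfl
  have hmem : (idx, v) ∈ l := lookup_mem hl
  have : (idx, v) ∈ peelAcyclic^[l.length] l :=
    stay l idx v hmem hv l.length (le_refl _)
  have : hasKey (peelAcyclic^[l.length] l) idx = true :=
    (hasKey_true_iff _ _).mpr ⟨(idx, v), this, rfl⟩
  simp [this] at hi

-- the measure: first peeling step at which k is no longer a key
def mu (l : List (Int × Int)) (k : Int)
    (h : ∃ j, hasKey (peelAcyclic^[j] l) k = false) : Nat :=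
  Nat.find h

theorem mu_dec (l : List (Int × Int)) (idx v : Int)
    (hl : l.lookup idx = some v)
    (hi : ∃ j, hasKey (peelAcyclic^[j] l) idx = false)
    (hv : ∃ j, hasKey (peelAcyclic^[j] l) v = false) :
    mu l v hv < mu l idx hi := by
  set m := mu l v hv with hm
  -- the entry (idx, v) survives every peeling step up to m
  have surv : ∀ j, j ≤ m → (idx, v) ∈ peelAcyclic^[j] l := by
    intro j
    induction j with
    | zero => intro _; simpa using lookup_mem hl
    | succ j ih =>
      intro hj
      have hjm : j < m := hj
      have hmemj : (idx, v) ∈ peelAcyclic^[j] l := ih (Nat.le_of_succ_le hj)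
      have hvj : hasKey (peelAcyclic^[j] l) v = true := by
        have := Nat.find_min hv hjm
        cases hvv : hasKey (peelAcyclic^[j] l) v with
        | false => exact absurd hvv this
        | true => rfl
      rw [Function.iterate_succ_apply']
      unfold peelAcyclic
      rw [List.mem_filter]
      refine ⟨hmemj, ?_⟩
      rcases (hasKey_true_iff _ _).mp hvj with ⟨q, hq, hqk⟩
      simp only [List.any_eq_true]
      exact ⟨q, hq, by simp [hqk]⟩
  -- hence idx is still a key at step m, so mu idx > m
  by_contra hle
  push_neg at hle
  have hfind : hasKey (peelAcyclic^[mu l idx hi] l) idx = false := Nat.find_spec hi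
  have hmemm : (idx, v) ∈ peelAcyclic^[m] l := surv m (le_refl _)
  have : (idx, v) ∈ peelAcyclic^[mu l idx hi] l :=
    (iter_sublist l hle).subset hmemm
  have : hasKey (peelAcyclic^[mu l idx hi] l) idx = true :=
    (hasKey_true_iff _ _).mpr ⟨(idx, v), this, rfl⟩
  simp [this] at hfind

-- popping key x does not change the lookup of any other key
theorem lookup_eraseKey_ne (l : List (Int × Int)) (x k : Int) (h : k ≠ x) :
    (eraseKey l x).lookup k = l.lookup k := by
  induction l with
  | nil => simp [eraseKey]
  | cons a t ih =>
    obtain ⟨a1, a2⟩ := a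
    by_cases hx : a1 = x
    · have hx1 : (a1 == x) = true := by simp [beq_iff_eq, hx]
      have hak : (k == a1) = false := by simp [beq_iff_eq]; omega
      simp [eraseKey, List.eraseP_cons, hx1, List.lookup, hak]
    · have hx1 : (a1 == x) = false := by simp [beq_iff_eq]; omega
      by_cases hak : k = a1
      · have hak1 : (k == a1) = true := by simp [beq_iff_eq, hak]
        simp [eraseKey, List.eraseP_cons, hx1, List.lookup, hak1]
      · have hak1 : (k == a1) = false := by simp [beq_iff_eq]; omega
        simp only [eraseKey, List.eraseP_cons, hx1] at ih ⊢
        simp [List.lookup, hak1]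
        exact ih

-- MAIN LEMMA: A's fueled recursion over the fixed table equals B's loop over any shrinking
-- copy that still agrees with the table on every key the remaining chase can touch.
theorem main_eq (l : List (Int × Int)) :
    ∀ (fuel : Nat) (idx : Int)
      (hi : ∃ j, hasKey (peelAcyclic^[j] l) idx = false),
      hasKey (peelAcyclic^[l.length] l) idx = false →
      mu l idx hi < fuel →
      ∀ (remaining : List (Int × Int)) (path : List Int),
        (∀ (k : Int) (hk : ∃ j, hasKey (peelAcyclic^[j] l) k = false),
            mu l k hk ≤ mu l idx hi → remaining.lookup k = l.lookup k) →
        rfindRec fuel l idx = rfindAltGo remaining idx path := by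
  intro fuel
  induction fuel with
  | zero => intro idx hi _ hfuel; omega
  | succ fuel ih =>
    intro idx hi hin hfuel remaining path hrem
    have hridx : remaining.lookup idx = l.lookup idx := hrem idx hi (le_refl _)
    cases hl : l.lookup idx with
    | none =>
      have hr : remaining.lookup idx = none := hridx.trans hl
      rw [rfindAltGo]
      simp only [rfindRec, pyDictGet?, hl]
      split
      · rfl
      · next v heq => rw [hr] at heq; exact absurd heq (by simp)
    | some v =>
      have hr : remaining.lookup idx = some v := hridx.trans hl
      have hstep : rfindRec (fuel + 1) l idx = rfindRec fuel l v := by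
        simp [rfindRec, pyDictGet?, hl]
      have hbstep : rfindAltGo remaining idx path
          = rfindAltGo (eraseKey remaining idx) v (path ++ [idx]) := by
        rw [rfindAltGo]
        split
        · next heq => rw [hr] at heq; exact absurd heq (by simp)
        · next v' heq =>
            rw [hr] at heq
            cases heq
            rfl
      -- the successor stays outside the residue, with a strictly smaller measure
      have hvout : hasKey (peelAcyclic^[l.length] l) v = false := chain_out l idx v hin hl
      have hv : ∃ j, hasKey (peelAcyclic^[j] l) v = false := ⟨l.length, hvout⟩
      have hdec : mu l v hv < mu l idx hi := mu_dec l idx v hl hi hv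
      rw [hstep, hbstep]
      refine ih v hv hvout (by omega) (eraseKey remaining idx) (path ++ [idx]) ?_
      intro k hk hkle
      have hkidx : mu l k hk < mu l idx hi := lt_of_le_of_lt hkle hdec
      have hkne : k ≠ idx := by
        intro hkeq
        subst hkeq
        have : mu l k hk = mu l k hi := by
          unfold mu; exact congrArg Nat.find (Subsingleton.elim _ _)
        omega
      rw [lookup_eraseKey_ne _ _ _ hkne]
      exact hrem k hk (le_of_lt hkidx)

-- ===== VERDICT (by name: the statement is the Claim_ definition above) =====
theorem rfind_spec : Claim_equal_rfind := by
  intro visited idx _ hpre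
  unfold Spec_rfind rfind rfind_alt
  have hi : ∃ j, hasKey (peelAcyclic^[j] visited) idx = false := ⟨visited.length, hpre⟩
  have hmu : mu visited idx hi ≤ visited.length := Nat.find_le hpre
  exact main_eq visited (visited.length + 1) idx hi hpre (by omega) visited [] (fun _ _ _ => rfl)
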